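-- pv_equiv track=rewrite | github.com/LoganKells/leetcode-practice | code_assessments/hudson_river_trading/print_error_message.py | print_error
-- ===== SOURCE A (Python) =====
-- def print_error(s: str, y: int, z: int):
--     """
--     :param s: input text
--     :param y: index of the error in s
--     :param z: maximum number of characters to return on each side of the error
--     :return: error message
--     """
--     s_split = s.split("\n")
--     for i, sub_string in enumerate(s_split):
--         s_split[i] = sub_string + "\n"
--
--     b4_error = s[y - 1]
--     error_point = s[y]
--
--     sub_string_lengths = {}
--     # determine which sub-string the error is in
--     for i, sub_string in enumerate(s_split):
--         sub_string_lengths[i] = len(sub_string)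
--
--     # Determine which substring the error is inside of
--     running_length = 0
--     idx_sub_strings_w_error = 0
--     idx_error_from_start = 0
--     for idx_sub_string, length in sub_string_lengths.items():
--         running_length += length
--         if y <= running_length:  # Error is in this sub_string
--             idx_sub_strings_w_error += idx_sub_string
--             idx_error_from_end = running_length - y
--             idx_error_from_start = len(s_split[idx_sub_string]) - idx_error_from_end
--             break
--
--     # Create the final return
--     line_w_error = s_split[idx_sub_strings_w_error]
--     line_above = s_split[idx_sub_strings_w_error - 1] if idx_sub_strings_w_error > 0 else ""
--     line_below = s_split[idx_sub_strings_w_error + 1] if len(s_split) > idx_sub_strings_w_error + 1 else ""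
--
--     # return results
--     error_message_lines = (line_above, line_w_error, line_below)
--     idx_error = len(line_above) + idx_error_from_start
--     error_message = "".join(error_message_lines)
--
--     # Clip the left and right side with z
--     left_side = error_message[:idx_error]
--     left_side_rev = left_side[::-1]
--     end_left = min(len(left_side), z)
--     left_side_rev = left_side_rev[:end_left]
--     left_side = left_side_rev[::-1]
--
--     right_side = error_message[idx_error + 1:]
--     right_side_rev = right_side[::-1]
--     end_right = min(len(right_side), z)
--     right_side_rev = right_side_rev[:end_right]
--     right_side = right_side_rev[::-1]
--
--     # Create the line with the ^ carrot just after the error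
--     spaces = []
--     for i in range(len(left_side)):
--         spaces.append(" ")
--     spaces.append("^\n")
--     line_w_carrot = "".join(spaces)
--
--
--     # Return clipped error message
--     error_message_lines = (left_side, s[y], "\n", line_w_carrot, right_side)
--     error_message_final = "".join(error_message_lines)
--
--     return error_message_final
-- ===== SOURCE B (Python) =====
-- def print_error(s: str, y: int, z: int):
--     """
--     :param s: input text
--     :param y: index of the error in s
--     :param z: maximum number of characters to return on each side of the error
--     :return: error message
--     """
--     ch = s[y]                                   # keeps IndexError for out-of-range y
--     # Locate the error line by local newline searches instead of splitting s:
--     # a = newline that ends the previous line (tie rule: a char at the very start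
--     # of a line still belongs to the previous line, hence the y-1 bound).
--     a = s.rfind("\n", 0, max(0, y - 1))
--     start = a + 1                               # start of the line holding the error
--     e = s.find("\n", start)                     # newline ending that line, or -1
--     above = "" if a == -1 else s[s.rfind("\n", 0, a) + 1 : a + 1]
--     if e == -1:
--         cur, below = s[start:] + "\n", ""
--     else:
--         cur = s[start : e + 1]
--         f = s.find("\n", e + 1)
--         below = s[e + 1 : f + 1] if f != -1 else s[e + 1 :] + "\n"
--     window = above + cur + below
--     idx = len(above) + (y - start)
--     left = window[max(0, idx - z) : idx]
--     tail = window[idx + 1 :]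
--     right = tail[max(0, len(tail) - z) :]
--     return left + ch + "\n" + " " * len(left) + "^\n" + right
-- ===== Notes on version B (the rewrite author's own statement) =====
-- stated objective: alternative
-- what changed: B never splits the string into lines: it locates the error line's boundaries directly with local newline searches (s.rfind('\n',0,max(0,y-1)), s.find('\n',start)) around the index, then cuts the clipped window out of s with direct slices, replacing A's split-every-line pass, per-line length dict, cumulative scan loop and reverse-slice clipping; intended as window-local work, measured only ~1.3x at the largest size, so no speed is claimed.
-- outside the precondition, e.g. on print_error('ab\ncd', -2, 2): A returns '\ncc\n  ^\n\n', B returns 'ab\ncc\n    ^\n\n'; on print_error('ab\ncd', 1, -1): A returns 'b\n^\ncd\n', B returns 'b\n^\n'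
import Mathlib
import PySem

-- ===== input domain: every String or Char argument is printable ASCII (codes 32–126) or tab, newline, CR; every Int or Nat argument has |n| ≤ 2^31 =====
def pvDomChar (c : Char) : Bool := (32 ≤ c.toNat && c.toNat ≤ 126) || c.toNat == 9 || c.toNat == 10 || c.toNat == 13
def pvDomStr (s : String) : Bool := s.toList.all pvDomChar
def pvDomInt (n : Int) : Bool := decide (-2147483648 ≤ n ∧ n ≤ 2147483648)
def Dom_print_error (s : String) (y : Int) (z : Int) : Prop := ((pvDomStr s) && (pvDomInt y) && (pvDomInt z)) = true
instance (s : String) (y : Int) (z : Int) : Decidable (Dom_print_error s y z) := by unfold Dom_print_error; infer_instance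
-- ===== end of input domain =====

-- B locates the error line by local newline searches (str.rfind / str.find around the
-- index) instead of A's split-into-lines pass with a length dict and a scan loop;
-- the clipped window is then cut out with direct slices.

-- ===== PORT A =====
-- the 'for idx_sub_string, length in sub_string_lengths.items():' loop with its break
def pvItemsLoopA (s_split : List (List Char)) (y : Int) :
    List (Int × Int) → Int → Int × Int
  | [], _ => (0, 0)
  | (i, length) :: rest, running_length =>
      let running_length' := running_length + length
      if y ≤ running_length' then
        let idx_sub := 0 + i
        let idx_error_from_end := running_length' - y
        let idx_error_from_start :=
          ((PySem.List.pyGetD s_split i []).length : Int) - idx_error_from_end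
        (idx_sub, idx_error_from_start)
      else pvItemsLoopA s_split y rest running_length'

def print_error (s : String) (y : Int) (z : Int) : String :=
  let cs := s.toList
  let s_split0 := PySem.Chars.splitOn cs ['\n']
  -- for i, sub_string in enumerate(s_split): s_split[i] = sub_string + "\n"
  let s_split := (PySem.List.enumerate s_split0 0).foldl
      (fun acc p => PySem.List.pySetD acc p.1 (p.2 ++ ['\n'])) s_split0
  let _b4_error := PySem.List.pyGetD cs (y - 1) ' '   -- s[y-1]; in range under Pre_
  let error_point := PySem.List.pyGetD cs y ' '       -- s[y]; in range under Pre_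
  let sub_string_lengths : PySem.Dict Int Int := (PySem.List.enumerate s_split 0).foldl
      (fun d p => d.insert p.1 ((p.2.length : Int))) PySem.Dict.empty
  let r := pvItemsLoopA s_split y sub_string_lengths.items 0
  let idx_sub_strings_w_error := r.1
  let idx_error_from_start := r.2
  let line_w_error := PySem.List.pyGetD s_split idx_sub_strings_w_error []
  let line_above := if idx_sub_strings_w_error > 0 then
      PySem.List.pyGetD s_split (idx_sub_strings_w_error - 1) [] else []
  let line_below := if (s_split.length : Int) > idx_sub_strings_w_error + 1 then
      PySem.List.pyGetD s_split (idx_sub_strings_w_error + 1) [] else []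
  let error_message := PySem.Chars.join [] [line_above, line_w_error, line_below]
  let idx_error : Int := (line_above.length : Int) + idx_error_from_start
  let left_side := PySem.List.slice error_message none (some idx_error)
  let left_side_rev := left_side.reverse      -- [::-1] (slice?_none_none_neg_one)
  let end_left := min ((left_side.length : Int)) z
  let left_side_rev' := PySem.List.slice left_side_rev none (some end_left)
  let left_side' := left_side_rev'.reverse
  let right_side := PySem.List.slice error_message (some (idx_error + 1)) none
  let right_side_rev := right_side.reverse    -- [::-1]
  let end_right := min ((right_side.length : Int)) z
  let right_side_rev' := PySem.List.slice right_side_rev none (some end_right)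
  let right_side' := right_side_rev'.reverse
  let spaces := (PySem.List.pyRange 0 ((left_side'.length : Int)) 1).foldl
      (fun acc _ => acc ++ [[' ']]) ([] : List (List Char))
  let spaces' := spaces ++ [['^', '\n']]
  let line_w_carrot := PySem.Chars.join [] spaces'
  let error_message_final := PySem.Chars.join []
      [left_side', [error_point], ['\n'], line_w_carrot, right_side']
  String.ofList error_message_final

-- ===== PORT B =====
def print_error_alt (s : String) (y : Int) (z : Int) : String :=
  let cs := s.toList
  let ch := PySem.List.pyGetD cs y ' '      -- s[y]; in range under Pre_
  -- a = s.rfind("\n", 0, max(0, y - 1))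
  let a := PySem.Chars.rfindFrom cs ['\n'] 0 (some (max 0 (y - 1)))
  let start := a + 1
  -- e = s.find("\n", start)
  let e := PySem.Chars.findFrom cs ['\n'] start
  -- above = "" if a == -1 else s[s.rfind("\n", 0, a) + 1 : a + 1]
  let above := if a = -1 then ([] : List Char)
    else PySem.List.slice cs (some (PySem.Chars.rfindFrom cs ['\n'] 0 (some a) + 1)) (some (a + 1))
  -- cur, below from the if/else on e
  let cb :=
    if e = -1 then (PySem.List.slice cs (some start) none ++ ['\n'], ([] : List Char))
    else
      let cur := PySem.List.slice cs (some start) (some (e + 1))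
      let f := PySem.Chars.findFrom cs ['\n'] (e + 1)
      let below := if f ≠ -1 then PySem.List.slice cs (some (e + 1)) (some (f + 1))
        else PySem.List.slice cs (some (e + 1)) none ++ ['\n']
      (cur, below)
  let window := above ++ cb.1 ++ cb.2
  let idx := (above.length : Int) + (y - start)
  let left := PySem.List.slice window (some (max 0 (idx - z))) (some idx)
  let tail := PySem.List.slice window (some (idx + 1)) none
  let right := PySem.List.slice tail (some (max 0 ((tail.length : Int) - z))) none
  String.ofList (left ++ [ch] ++ ['\n'] ++ List.replicate left.length ' ' ++ ['^', '\n'] ++ right)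

-- ===== PRECONDITION & SPEC =====
-- Pre_ excludes negative y and negative z — negative index/clip counts outside the
-- function's natural domain, where A's values arise from Python negative-index
-- wraparound — and y ≥ len(s), where A raises IndexError at s[y].
def Pre_print_error (s : String) (y : Int) (z : Int) : Prop :=
  0 ≤ y ∧ y < (s.toList.length : Int) ∧ 0 ≤ z
instance (s : String) (y : Int) (z : Int) : Decidable (Pre_print_error s y z) := by
  unfold Pre_print_error; infer_instance
def pvWitness_print_error : String × Int × Int := ("ab\ncd\ne", 4, 2)
def Spec_print_error (s : String) (y : Int) (z : Int) (out : String) : Prop :=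
  out = print_error_alt s y z
instance (s : String) (y : Int) (z : Int) (out : String) : Decidable (Spec_print_error s y z out) := by
  unfold Spec_print_error; infer_instance

-- ===== CLAIM (what is proved, stated in full; the proofs are below) =====
def Claim_equal_print_error : Prop := ∀ (s : String) (y : Int) (z : Int),
  Dom_print_error s y z → Pre_print_error s y z →
  Spec_print_error s y z (print_error s y z)

-- ===== LEMMAS AND PROOFS =====

-- proof-only helpers
def pvSumNl (ls : List (List Char)) : Int := (ls.map (fun l => (l.length : Int) + 1)).sum
def pvStN (ls : List (List Char)) : Nat := (ls.map (fun l => l.length + 1)).sum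

-- reference splitter: the pieces of cur.reverse ++ l split at '\n'
def pvSplits : List Char → List Char → List (List Char)
  | [], cur => [cur.reverse]
  | c :: rest, cur =>
      if c = '\n' then cur.reverse :: pvSplits rest [] else pvSplits rest (c :: cur)

-- joining the pieces back with '\n'
def pvJoinNl : List (List Char) → List Char
  | [] => []
  | [a] => a
  | a :: b :: rest => a ++ '\n' :: pvJoinNl (b :: rest)

-- A-loop intermediate form
def pvFIdx (y : Int) : List (List Char) → Nat → Int → Int × Int
  | [], _, _ => (0, 0)
  | e :: rest, k, start =>
      if y ≤ start + (e.length : Int) then ((k : Int), y - start)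
      else pvFIdx y rest (k + 1) (start + (e.length : Int))

-- reference scanner characterising which line the error index falls in
def pvScanB (y : Int) : List (List Char) → Int → Int → Int × Int
  | [], L, start => (L, start)
  | ln :: rest, L, start =>
      if y > start + (ln.length : Int) + 1 then
        pvScanB y rest (L + 1) (start + (ln.length : Int) + 1)
      else (L, start)

-- canonical form both ports reduce to
def pvCanon (ab cur bl : List Char) (y st z : Int) (ch : Char) : List Char :=
  let window := ab ++ cur ++ bl
  let idx := (ab.length : Int) + (y - st)
  let left := PySem.List.slice window (some (max 0 (idx - z))) (some idx)
  let tail := PySem.List.slice window (some (idx + 1)) none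
  let right := PySem.List.slice tail (some (max 0 ((tail.length : Int) - z))) none
  left ++ [ch] ++ ['\n'] ++ List.replicate left.length ' ' ++ ['^', '\n'] ++ right

theorem pvSumNl_eq_stN (ls : List (List Char)) : pvSumNl ls = (pvStN ls : Int) := by
  induction ls with
  | nil => simp [pvSumNl, pvStN]
  | cons a l ih => simp [pvSumNl, pvStN] at ih ⊢; omega

theorem pvGo_eq (fuel : Nat) : ∀ (l cur : List Char) (acc : List (List Char)),
    l.length < fuel →
    PySem.Chars.splitOn.go ['\n'] fuel l cur acc = acc.reverse ++ pvSplits l cur := by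
  induction fuel with
  | zero => intro l cur acc h; exact absurd h (by omega)
  | succ n ih =>
    intro l cur acc h
    cases l with
    | nil =>
      rw [PySem.Chars.splitOn.go.eq_def]
      simp [pvSplits]
    | cons c rest =>
      rw [PySem.Chars.splitOn.go.eq_def]
      simp only [pvSplits]
      by_cases hc : c = '\n'
      · subst hc
        rw [if_pos (by simp [List.isPrefixOf])]
        rw [if_pos rfl]
        simp only [List.length_cons, List.length_nil, List.drop_succ_cons, List.drop_zero]
        rw [ih rest [] (List.reverse cur :: acc) (by simp at h; omega)]
        simp
      · rw [if_neg (by simp [List.isPrefixOf]; exact fun hcc => hc hcc.symm)]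
        rw [if_neg hc]
        exact ih rest (c :: cur) acc (by simp at h; omega)

theorem pvSplitOn_eq (cs : List Char) :
    PySem.Chars.splitOn cs ['\n'] = pvSplits cs [] := by
  rw [PySem.Chars.splitOn.eq_def]
  rw [pvGo_eq (cs.length + 1) cs [] [] (by omega)]
  simp

theorem pvSplits_ne_nil (l cur : List Char) : pvSplits l cur ≠ [] := by
  induction l generalizing cur with
  | nil => simp [pvSplits]
  | cons c rest ih =>
    simp only [pvSplits]
    split
    · simp
    · exact ih _

theorem pvSumNl_splits (l : List Char) : ∀ cur,
    pvSumNl (pvSplits l cur) = (cur.length : Int) + l.length + 1 := by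
  induction l with
  | nil => intro cur; simp [pvSplits, pvSumNl]
  | cons c rest ih =>
    intro cur
    simp only [pvSplits]
    split
    · have := ih []
      simp [pvSumNl] at this ⊢
      omega
    · have := ih (c :: cur)
      simp [pvSumNl] at this ⊢
      omega

theorem pvJoinNl_cons (a : List Char) (ls : List (List Char)) (h : ls ≠ []) :
    pvJoinNl (a :: ls) = a ++ '\n' :: pvJoinNl ls := by
  cases ls with
  | nil => exact absurd rfl h
  | cons b r => rfl

theorem pvJoinNl_splits : ∀ (l cur : List Char),
    pvJoinNl (pvSplits l cur) = cur.reverse ++ l := by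
  intro l
  induction l with
  | nil => intro cur; simp [pvSplits, pvJoinNl]
  | cons c rest ih =>
    intro cur
    simp only [pvSplits]
    by_cases hc : c = '\n'
    · subst hc
      rw [if_pos rfl, pvJoinNl_cons _ _ (pvSplits_ne_nil _ _), ih []]
      simp
    · rw [if_neg hc, ih (c :: cur)]
      simp

theorem pvSplits_clean : ∀ (l cur : List Char), '\n' ∉ cur →
    ∀ p ∈ pvSplits l cur, '\n' ∉ p := by
  intro l
  induction l with
  | nil =>
    intro cur hcur p hp
    simp [pvSplits] at hp
    subst hp
    simpa using hcur
  | cons c rest ih =>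
    intro cur hcur p hp
    simp only [pvSplits] at hp
    by_cases hc : c = '\n'
    · subst hc
      rw [if_pos rfl] at hp
      rcases List.mem_cons.mp hp with h | h
      · subst h; simpa using hcur
      · exact ih [] (by simp) p h
    · rw [if_neg hc] at hp
      refine ih (c :: cur) ?_ p hp
      intro hmem
      rcases List.mem_cons.mp hmem with h | h
      · exact hc h.symm
      · exact hcur h

theorem pvJoinNl_length : ∀ ls : List (List Char), ls ≠ [] →
    (pvJoinNl ls).length + 1 = pvStN ls := by
  intro ls
  induction ls with
  | nil => intro h; exact absurd rfl h
  | cons a r ih =>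
    intro _
    cases r with
    | nil => simp [pvJoinNl, pvStN]
    | cons b t =>
      rw [pvJoinNl_cons _ _ (by simp)]
      have := ih (by simp)
      simp [pvStN] at this ⊢
      omega

theorem pvStN_take_drop (ls : List (List Char)) (j : Nat) :
    pvStN ls = pvStN (ls.take j) + pvStN (ls.drop j) := by
  conv_lhs => rw [← List.take_append_drop j ls]
  simp [pvStN]

theorem pvStN_ge_length : ∀ ls : List (List Char), ls.length ≤ pvStN ls := by
  intro ls
  induction ls with
  | nil => simp [pvStN]
  | cons a r ih => simp [pvStN] at ih ⊢; omega

theorem pvJoinNl_decomp : ∀ (ls : List (List Char)) (j : Nat), 0 < j → j < ls.length →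
    pvJoinNl ls = pvJoinNl (ls.take j) ++ '\n' :: pvJoinNl (ls.drop j) := by
  intro ls
  induction ls with
  | nil => intro j h1 h2; simp at h2
  | cons a r ih =>
    intro j h1 h2
    match j, h1 with
    | 1, _ =>
      have hr : r ≠ [] := by
        simp at h2
        exact List.ne_nil_of_length_pos (by omega)
      rw [pvJoinNl_cons _ _ hr]
      simp [pvJoinNl]
    | (m+2), _ =>
      have hr : r ≠ [] := by
        simp at h2
        exact List.ne_nil_of_length_pos (by omega)
      rw [pvJoinNl_cons _ _ hr]
      rw [ih (m+1) (by omega) (by simp at h2 ⊢; omega)]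
      simp only [List.take_succ_cons, List.drop_succ_cons]
      rw [pvJoinNl_cons _ _ ?_]
      · simp
      · have hlen : (r.take (m+1)).length = m + 1 := by
          simp at h2 ⊢
          omega
        exact List.ne_nil_of_length_pos (by omega)

-- singleton prefix/infix characterisations
theorem pvSingPrefix (t : List Char) (c : Char) : [c] <+: t ↔ t[0]? = some c := by
  cases t with
  | nil => simp
  | cons a r => simp [List.cons_prefix_cons, eq_comm]

theorem pvSingInfix (l : List Char) (c : Char) : [c] <:+: l ↔ c ∈ l := by
  constructor
  · intro h
    exact h.subset (by simp)
  · intro h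
    obtain ⟨u, v, rfl⟩ := List.append_of_mem h
    exact ⟨u, v, by simp⟩

theorem pvTakeNl (u v : List Char) : (u ++ '\n' :: v).take (u.length + 1) = u ++ ['\n'] := by
  rw [List.take_append, List.take_of_length_le (by omega)]
  have h : u.length + 1 - u.length = 1 := by omega
  rw [h]
  simp

-- rfind characterisation
theorem pvRGoNeg (s : List Char) (c : Char) : ∀ j, (∀ i, i ≤ j → s[i]? ≠ some c) →
    PySem.Chars.rfind.go s [c] j = -1 := by
  intro j
  induction j with
  | zero =>
    intro h
    rw [PySem.Chars.rfind.go]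
    rw [if_neg]
    intro hpre
    have := (pvSingPrefix s c).mp (List.isPrefixOf_iff_prefix.mp hpre)
    exact h 0 (by omega) this
  | succ n ih =>
    intro h
    rw [PySem.Chars.rfind.go]
    rw [if_neg]
    · exact ih (fun i hi => h i (by omega))
    · intro hpre
      have := (pvSingPrefix _ c).mp (List.isPrefixOf_iff_prefix.mp hpre)
      rw [List.getElem?_drop] at this
      exact h (n+1) (by omega) (by simpa using this)

theorem pvRGoPos (s : List Char) (c : Char) (i : Nat) (hi : s[i]? = some c) :
    ∀ j, i ≤ j → (∀ k, i < k → k ≤ j → s[k]? ≠ some c) →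
    PySem.Chars.rfind.go s [c] j = (i : Int) := by
  intro j
  induction j with
  | zero =>
    intro hij _
    have h0 : i = 0 := by omega
    subst h0
    rw [PySem.Chars.rfind.go]
    rw [if_pos (List.isPrefixOf_iff_prefix.mpr ((pvSingPrefix s c).mpr hi))]
    simp
  | succ n ih =>
    intro hij h
    by_cases hcase : i = n + 1
    · subst hcase
      rw [PySem.Chars.rfind.go]
      rw [if_pos (List.isPrefixOf_iff_prefix.mpr ((pvSingPrefix _ c).mpr (by
        rw [List.getElem?_drop]; simpa using hi)))]
    · rw [PySem.Chars.rfind.go]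
      rw [if_neg]
      · exact ih (by omega) (fun k hk1 hk2 => h k hk1 (by omega))
      · intro hpre
        have := (pvSingPrefix _ c).mp (List.isPrefixOf_iff_prefix.mp hpre)
        rw [List.getElem?_drop] at this
        exact h (n+1) (by omega) (by omega) (by simpa using this)

theorem pvRfind_neg (l : List Char) (h : '\n' ∉ l) :
    PySem.Chars.rfind l ['\n'] = -1 := by
  rw [PySem.Chars.rfind]
  apply pvRGoNeg
  intro i _ hget
  exact h (List.mem_of_getElem? hget)

theorem pvRfind_pos (l1 l2 : List Char) (h : '\n' ∉ l2) :
    PySem.Chars.rfind (l1 ++ '\n' :: l2) ['\n'] = (l1.length : Int) := by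
  rw [PySem.Chars.rfind]
  apply pvRGoPos
  · rw [List.getElem?_append_right (by omega)]
    simp
  · simp
  · intro k hk1 _ hget
    rw [List.getElem?_append_right (by omega)] at hget
    have h2 : ('\n' :: l2)[k - l1.length]? = some '\n' := hget
    have h3 : k - l1.length = (k - l1.length - 1) + 1 := by omega
    rw [h3] at h2
    simp at h2
    exact h (List.mem_of_getElem? h2)

-- s.rfind('\n', 0, m) for 0 ≤ m ≤ len(s) is rfind on the prefix of length m
theorem pvRFF (csl : List Char) (m : Int) (h0 : 0 ≤ m) (hm : m ≤ (csl.length : Int)) :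
    PySem.Chars.rfindFrom csl ['\n'] 0 (some m) =
      PySem.Chars.rfind (csl.take m.toNat) ['\n'] := by
  rw [PySem.Chars.rfindFrom]
  rw [if_neg (by omega : ¬ ((csl.length:Int) < m)), if_neg (by omega : ¬ (m < 0)),
      if_neg (by omega : ¬ ((0:Int) < 0)), if_neg (by omega : ¬ (m < 0))]
  simp only [Int.toNat_zero, List.drop_zero]
  split <;> omega

-- find characterisation
theorem pvFind_neg (l : List Char) (h : '\n' ∉ l) :
    PySem.Chars.find l ['\n'] = -1 :=
  (PySem.Chars.find_eq_neg_one_iff l ['\n']).mpr (fun hin => h ((pvSingInfix l '\n').mp hin))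

theorem pvFind_pos (l1 l2 : List Char) (h : '\n' ∉ l1) :
    PySem.Chars.find (l1 ++ '\n' :: l2) ['\n'] = (l1.length : Int) := by
  set s := l1 ++ '\n' :: l2 with hs
  have hin : ['\n'] <:+: s := (pvSingInfix s '\n').mpr (by simp [hs])
  have hr0 : 0 ≤ PySem.Chars.find s ['\n'] := (PySem.Chars.find_nonneg_iff s ['\n']).mpr hin
  obtain ⟨hpre, hmin⟩ := PySem.Chars.find_spec hr0
  have hat : s[(PySem.Chars.find s ['\n']).toNat]? = some '\n' := by
    have := (pvSingPrefix _ '\n').mp hpre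
    rwa [List.getElem?_drop, Nat.add_zero] at this
  have hne : (PySem.Chars.find s ['\n']).toNat = l1.length := by
    by_contra hneq
    rcases Nat.lt_or_ge (PySem.Chars.find s ['\n']).toNat l1.length with hlt | hge
    · rw [hs, List.getElem?_append_left hlt] at hat
      exact h (List.mem_of_getElem? hat)
    · have hlt2 : l1.length < (PySem.Chars.find s ['\n']).toNat := by omega
      apply hmin l1.length hlt2
      rw [pvSingPrefix, List.getElem?_drop, Nat.add_zero, hs,
        List.getElem?_append_right (by omega)]
      simp
  omega

-- the scanner finds the line the A-loop tie rule selects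
theorem pvScan_spec (y : Int) : ∀ (lines : List (List Char)) (k : Nat) (start : Int),
    lines ≠ [] → start ≤ y → y ≤ start + pvSumNl lines →
    ∃ (j : Nat) (e : List Char), j < lines.length ∧ lines[j]? = some e ∧
      pvScanB y lines (k : Int) start = ((k : Int) + j, start + pvSumNl (lines.take j)) ∧
      start + pvSumNl (lines.take j) ≤ y ∧
      y ≤ start + pvSumNl (lines.take j) + e.length + 1 ∧
      (0 < j → start + pvSumNl (lines.take j) < y) := by
  intro lines
  induction lines with
  | nil => intro k start h; exact absurd rfl h
  | cons ln rest ih =>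
    intro k start _ hsy hy
    by_cases hcond : y > start + (ln.length : Int) + 1
    · have hrest : rest ≠ [] := by
        rintro rfl
        simp [pvSumNl] at hy
        omega
      have hy' : y ≤ (start + (ln.length : Int) + 1) + pvSumNl rest := by
        simp [pvSumNl] at hy ⊢
        omega
      obtain ⟨j, e, hj, he, hscan, h1, h2, h3⟩ :=
        ih (k + 1) (start + (ln.length : Int) + 1) hrest (by omega) hy'
      refine ⟨j + 1, e, by simpa using Nat.succ_lt_succ hj, by simpa using he, ?_, ?_, ?_, ?_⟩
      · have hcast : ((k : Int) + 1) = ((k + 1 : Nat) : Int) := by push_cast; ring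
        rw [pvScanB, if_pos hcond, hcast, hscan]
        simp only [List.take_succ_cons, pvSumNl, List.map_cons, List.sum_cons, Prod.mk.injEq]
        constructor
        · push_cast; ring
        · ring
      · simp [pvSumNl] at h1 ⊢
        omega
      · simp [pvSumNl] at h2 ⊢
        omega
      · intro _
        by_cases hj0 : 0 < j
        · have := h3 hj0
          simp [pvSumNl] at this ⊢
          omega
        · have hj00 : j = 0 := by omega
          subst hj00
          simp [pvSumNl]
          omega
    · push Not at hcond
      refine ⟨0, ln, by simp, by simp, ?_, by simpa [pvSumNl] using hsy,
        by simpa [pvSumNl] using hcond, by omega⟩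
      rw [pvScanB, if_neg (by omega)]
      simp [pvSumNl]

theorem pvLoopA_eq (y : Int) (S : List (List Char)) :
    ∀ (tail : List (List Char)) (k : Nat) (start : Int),
    S.drop k = tail →
    pvItemsLoopA S y
      ((PySem.List.enumerate tail (k : Int)).map (fun p => (p.1, (p.2.length : Int)))) start
      = pvFIdx y tail k start := by
  intro tail
  induction tail with
  | nil => intro k start hS; simp [PySem.List.enumerate_nil, pvItemsLoopA, pvFIdx]
  | cons e rest ih =>
    intro k start hS
    rw [PySem.List.enumerate_cons]
    simp only [List.map_cons]
    have hgot : PySem.List.pyGetD S ((k : Int)) [] = e := by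
      rw [PySem.List.pyGetD_natCast]
      rw [List.getD_eq_getElem?_getD]
      have h0 : (S.drop k)[0]? = some e := by rw [hS]; rfl
      rw [List.getElem?_drop, Nat.add_zero] at h0
      rw [h0]
      rfl
    by_cases hy : y ≤ start + (e.length : Int)
    · rw [pvItemsLoopA, pvFIdx]
      rw [if_pos hy, if_pos hy]
      rw [hgot]
      simp only [Prod.mk.injEq]
      constructor
      · ring
      · ring
    · rw [pvItemsLoopA, pvFIdx]
      rw [if_neg hy, if_neg hy]
      have hS' : S.drop (k + 1) = rest := by
        have := congrArg List.tail hS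
        rwa [List.tail_drop, List.tail_cons] at this
      have hcast : ((k : Int) + 1) = ((k + 1 : Nat) : Int) := by push_cast; ring
      rw [hcast]
      exact ih (k + 1) (start + (e.length : Int)) hS'

theorem pvFIdx_scan (y : Int) : ∀ (lines : List (List Char)) (k : Nat) (start : Int),
    lines ≠ [] → y ≤ start + pvSumNl lines →
    pvFIdx y (lines.map (· ++ ['\n'])) k start
      = ((pvScanB y lines (k : Int) start).1, y - (pvScanB y lines (k : Int) start).2) := by
  intro lines
  induction lines with
  | nil => intro k start h; exact absurd rfl h
  | cons ln rest ih =>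
    intro k start _ hy
    simp only [List.map_cons]
    rw [pvFIdx, pvScanB]
    simp only [List.length_append, List.length_cons, List.length_nil, Nat.cast_add,
      Nat.cast_one, Nat.cast_zero]
    split_ifs with h1 h2
    · exfalso; omega
    · simp
    · have hrest : rest ≠ [] := by
        rintro rfl
        simp [pvSumNl] at hy
        omega
      have hy' : y ≤ (start + (ln.length : Int) + 1) + pvSumNl rest := by
        simp [pvSumNl] at hy ⊢
        omega
      have hih := ih (k + 1) (start + (ln.length : Int) + 1) hrest hy'
      have hcast : ((k : Int) + 1) = ((k + 1 : Nat) : Int) := by push_cast; ring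
      convert hih using 2
      all_goals (push_cast; ring)
    · exfalso; omega

theorem pvSet_append {α : Type} (v : α) : ∀ (pre : List α) (x : α) (l : List α),
    (pre ++ x :: l).set pre.length v = pre ++ v :: l := by
  intro pre
  induction pre with
  | nil => intro x l; simp
  | cons p ps ih =>
    intro x l
    simp only [List.cons_append, List.length_cons, List.set_cons_succ]
    rw [ih]

theorem pvSetAll_eq (f : List Char → List Char) : ∀ (l pre : List (List Char)),
    (PySem.List.enumerate l ((pre.length : Int))).foldl
      (fun acc p => PySem.List.pySetD acc p.1 (f p.2)) (pre ++ l) = pre ++ l.map f := by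
  intro l
  induction l with
  | nil => intro pre; simp [PySem.List.enumerate_nil]
  | cons x l ih =>
    intro pre
    rw [PySem.List.enumerate_cons, List.foldl_cons]
    have hset : PySem.List.pySetD (pre ++ x :: l) ((pre.length : Int)) (f x)
        = (pre ++ [f x]) ++ l := by
      rw [PySem.List.pySetD_natCast]
      rw [pvSet_append]
      simp
    rw [hset]
    have h2 := ih (pre ++ [f x])
    simp only [List.length_append, List.length_cons, List.length_nil] at h2
    push_cast at h2
    norm_num at h2
    simpa using h2

theorem pvJoin_nil_flatten (parts : List (List Char)) :
    PySem.Chars.join [] parts = parts.flatten := by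
  induction parts with
  | nil => simp [PySem.Chars.join_nil]
  | cons p rest ih =>
    cases rest with
    | nil => simp [PySem.Chars.join_singleton]
    | cons q rs =>
      rw [PySem.Chars.join_cons_cons]
      rw [ih]
      simp

theorem pvFoldl_append_const {α β : Type} (c : β) :
    ∀ (l : List α) (acc : List β),
    l.foldl (fun acc _ => acc ++ [c]) acc = acc ++ List.replicate l.length c := by
  intro l
  induction l with
  | nil => intro acc; simp
  | cons x l ih =>
    intro acc
    rw [List.foldl_cons, ih]
    simp [List.replicate_succ]

theorem pvClipLeft (W : List Char) (n z : Int) (hn : 0 ≤ n) (hz : 0 ≤ z)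
    (hnW : n ≤ (W.length : Int)) :
    (PySem.List.slice (PySem.List.slice W none (some n)).reverse none
        (some (min (((PySem.List.slice W none (some n)).length : Int)) z))).reverse
      = PySem.List.slice W (some (max 0 (n - z))) (some n) := by
  rw [PySem.List.slice_to W hn]
  have hTlen : (List.take n.toNat W).length = n.toNat := by
    simp
    omega
  rw [PySem.List.slice_to _ (le_min (Int.natCast_nonneg _) hz)]
  rw [List.take_reverse, List.reverse_reverse]
  rw [PySem.List.slice_toNat W (by omega : (0 : Int) ≤ max 0 (n - z)) hn]
  rw [List.drop_take]
  simp only [hTlen]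
  congr 1
  · omega
  · congr 1
    omega

theorem pvClipRight (R : List Char) (z : Int) (hz : 0 ≤ z) :
    (PySem.List.slice R.reverse none (some (min ((R.length : Int)) z))).reverse
      = PySem.List.slice R (some (max 0 ((R.length : Int) - z))) none := by
  rw [PySem.List.slice_to _ (le_min (Int.natCast_nonneg _) hz)]
  rw [List.take_reverse, List.reverse_reverse]
  rw [PySem.List.slice_from _ (le_max_left _ _)]
  congr 1
  omega

theorem pvCaret (m : Nat) :
    PySem.Chars.join [] ((PySem.List.pyRange 0 ((m : Int)) 1).foldl
        (fun acc _ => acc ++ [[' ']]) ([] : List (List Char)) ++ [['^', '\n']])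
      = List.replicate m ' ' ++ ['^', '\n'] := by
  rw [pvFoldl_append_const]
  rw [pvJoin_nil_flatten]
  have hlen : (PySem.List.pyRange 0 ((m : Int)) 1).length = m := by
    rw [PySem.List.pyRange_zero_natCast]
    simp
  rw [hlen]
  have hfl : ∀ (k : Nat) (c : Char), (List.replicate k [c]).flatten = List.replicate k c := by
    intro k c
    induction k with
    | zero => simp
    | succ m ihm => simp [List.replicate_succ, ihm]
  simp [hfl]

-- B reduces to the canonical form
theorem pvAltCanon (s : String) (y z : Int) (lines : List (List Char)) (j : Nat)
    (e : List Char)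
    (hcs : s.toList = pvJoinNl lines)
    (hclean : ∀ p ∈ lines, '\n' ∉ p)
    (hj : j < lines.length) (he : lines[j]? = some e)
    (hyl : ((pvStN (lines.take j)) : Int) ≤ y)
    (hys : 0 < j → ((pvStN (lines.take j)) : Int) < y)
    (hyu : y ≤ ((pvStN (lines.take j)) : Int) + e.length + 1)
    (hy0 : 0 ≤ y) (hylen : y < (s.toList.length : Int)) :
    print_error_alt s y z = String.ofList (pvCanon
      (if 0 < j then lines.getD (j-1) [] ++ ['\n'] else [])
      (e ++ ['\n'])
      (if j+1 < lines.length then lines.getD (j+1) [] ++ ['\n'] else [])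
      y ((pvStN (lines.take j)) : Int) z (PySem.List.pyGetD s.toList y ' ')) := by
  have hne : lines ≠ [] := List.ne_nil_of_length_pos (by omega)
  have hgetj : lines[j] = e := by
    rw [List.getElem?_eq_getElem hj] at he
    exact Option.some.inj he
  have hmeme : e ∈ lines := List.mem_of_getElem? he
  have hcleane : '\n' ∉ e := hclean e hmeme
  have hdropj : lines.drop j = e :: lines.drop (j+1) := by
    rw [List.drop_eq_getElem_cons hj, hgetj]
  have hLen : s.toList.length + 1 = pvStN lines := by
    rw [hcs]; exact pvJoinNl_length lines hne
  have hsplitTD : pvStN lines = pvStN (lines.take j) + pvStN (lines.drop j) :=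
    pvStN_take_drop lines j
  have hstNdropge : e.length + 1 ≤ pvStN (lines.drop j) := by
    rw [hdropj]; simp [pvStN]
  have htakelen : (lines.take j).length = j := by simp; omega
  have hstNge : j ≤ pvStN (lines.take j) := by
    have := pvStN_ge_length (lines.take j)
    omega
  set stN := pvStN (lines.take j) with hstN
  have hstN_le : stN ≤ s.toList.length := by omega
  -- drop stN cs = pvJoinNl (lines.drop j)
  have hdrop_cs : s.toList.drop stN = pvJoinNl (lines.drop j) := by
    by_cases hj0 : 0 < j
    · have hdec := pvJoinNl_decomp lines j hj0 hj
      have hPlen : (pvJoinNl (lines.take j)).length + 1 = stN := by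
        rw [hstN]
        exact pvJoinNl_length _ (by rw [← List.length_pos_iff]; omega)
      rw [hcs, hdec, List.drop_append]
      rw [List.drop_of_length_le (by omega)]
      have h1 : stN - (pvJoinNl (lines.take j)).length = 1 := by omega
      rw [h1]
      simp
    · have hj00 : j = 0 := by omega
      subst hj00
      have h0 : stN = 0 := by rw [hstN]; simp [pvStN]
      rw [h0]
      simpa using hcs
  have hmaxlen : max 0 (y-1) ≤ (s.toList.length : Int) := max_le (by omega) (by omega)
  -- a = s.rfind('\n', 0, max(0, y-1)) is the newline closing line j-1 (or -1)
  have hA : PySem.Chars.rfindFrom s.toList ['\n'] 0 (some (max 0 (y - 1))) = (stN : Int) - 1 := by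
    rw [pvRFF _ _ (le_max_left _ _) hmaxlen]
    by_cases hj0 : 0 < j
    · have hsty : (stN : Int) < y := hys hj0
      have hy1 : 1 ≤ y := by omega
      have hmaxeq : max 0 (y-1) = y - 1 := max_eq_right (by omega)
      have hPlen : (pvJoinNl (lines.take j)).length + 1 = stN := by
        rw [hstN]
        exact pvJoinNl_length _ (by rw [← List.length_pos_iff]; omega)
      have hdec := pvJoinNl_decomp lines j hj0 hj
      have hkle : (y-1).toNat - stN ≤ e.length := by omega
      have htk : s.toList.take (max 0 (y-1)).toNat
          = pvJoinNl (lines.take j) ++ '\n' :: e.take ((y-1).toNat - stN) := by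
        rw [hmaxeq, hcs, hdec, List.take_append]
        rw [List.take_of_length_le (by omega)]
        have h2 : (y-1).toNat - (pvJoinNl (lines.take j)).length = ((y-1).toNat - stN) + 1 := by
          omega
        rw [h2, List.take_succ_cons]
        congr 2
        rw [hdropj]
        by_cases hlast : lines.drop (j+1) = []
        · rw [hlast]
          rfl
        · rw [pvJoinNl_cons _ _ hlast, List.take_append]
          have h3 : (y-1).toNat - stN - e.length = 0 := by omega
          rw [h3]
          simp
      rw [htk, pvRfind_pos _ _ (fun hmem => hcleane (List.mem_of_mem_take hmem))]
      omega
    · have hj00 : j = 0 := by omega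
      subst hj00
      have h0 : stN = 0 := by rw [hstN]; simp [pvStN]
      have hm2 : (max 0 (y-1)).toNat ≤ e.length := by
        have h' : max 0 (y-1) ≤ (e.length : Int) := max_le (by omega) (by omega)
        omega
      have htk : s.toList.take (max 0 (y-1)).toNat = e.take (max 0 (y-1)).toNat := by
        have hJ0 : pvJoinNl lines = pvJoinNl (lines.drop 0) := by simp
        rw [hcs, hJ0, hdropj]
        by_cases hlast : lines.drop (0+1) = []
        · rw [hlast]
          rfl
        · rw [pvJoinNl_cons _ _ hlast, List.take_append]
          have h3 : (max 0 (y-1)).toNat - e.length = 0 := by omega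
          rw [h3]
          simp
      rw [htk, pvRfind_neg _ (fun hmem => hcleane (List.mem_of_mem_take hmem))]
      omega
  -- e = s.find('\n', start) is the newline closing line j (or -1 on the last line)
  have hFindE : PySem.Chars.findFrom s.toList ['\n'] ((stN : Nat) : Int)
      = (if j+1 < lines.length then ((stN : Nat) : Int) + e.length else -1) := by
    rw [PySem.Chars.findFrom_natCast s.toList ['\n'] stN hstN_le, hdrop_cs, hdropj]
    by_cases hlast : lines.drop (j+1) = []
    · rw [hlast]
      have hfe : PySem.Chars.find (pvJoinNl [e]) ['\n'] = -1 := pvFind_neg _ hcleane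
      rw [hfe, if_pos rfl, if_neg]
      have := List.drop_eq_nil_iff.mp hlast
      omega
    · rw [pvJoinNl_cons _ _ hlast, pvFind_pos _ _ hcleane]
      rw [if_neg (by omega : ¬((e.length : Int) = -1))]
      rw [if_pos]
      have := List.length_pos_of_ne_nil hlast
      simp at this
      omega
  -- the 'above' slice is line j-1 with its newline (or empty on the first line)
  have habove : (if (stN : Int) - 1 = -1 then ([] : List Char)
      else PySem.List.slice s.toList
        (some (PySem.Chars.rfindFrom s.toList ['\n'] 0 (some ((stN : Int) - 1)) + 1))
        (some ((stN : Int))))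
      = (if 0 < j then lines.getD (j-1) [] ++ ['\n'] else []) := by
    by_cases hj0 : 0 < j
    · rw [if_neg (by omega : ¬((stN : Int) - 1 = -1)), if_pos hj0]
      have hPlen : (pvJoinNl (lines.take j)).length + 1 = stN := by
        rw [hstN]
        exact pvJoinNl_length _ (by rw [← List.length_pos_iff]; omega)
      have hdec := pvJoinNl_decomp lines j hj0 hj
      have hsub : ((stN : Int) - 1) = ((stN - 1 : Nat) : Int) := by omega
      rw [hsub, pvRFF _ _ (by omega) (by omega)]
      rw [Int.toNat_natCast]
      have hP : s.toList.take (stN - 1) = pvJoinNl (lines.take j) := by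
        have h1 : stN - 1 = (pvJoinNl (lines.take j)).length := by omega
        rw [hcs, hdec, h1, List.take_left]
      rw [hP]
      by_cases hj1 : j = 1
      · subst hj1
        have htake1 : lines.take 1 = [lines.getD 0 []] := by
          cases lines with
          | nil => simp at hj
          | cons a r => simp
        rw [htake1]
        have hJ1 : pvJoinNl [lines.getD 0 []] = lines.getD 0 [] := rfl
        have hmem0 : lines.getD 0 [] ∈ lines := by
          cases lines with
          | nil => simp at hj
          | cons a r => simp
        rw [hJ1, pvRfind_neg _ (hclean _ hmem0)]
        have hz0' : (-1 : Int) + 1 = ((0 : Nat) : Int) := by norm_num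
        rw [hz0', PySem.List.slice_natCast]
        simp only [Nat.sub_zero, List.drop_zero]
        rw [hcs, hdec, List.take_append, List.take_of_length_le (by omega)]
        have h2 : stN - (pvJoinNl (lines.take 1)).length = 1 := by omega
        rw [h2, htake1, hJ1]
        simp
      · have hj2 : 2 ≤ j := by omega
        have hj1lt : j - 1 < lines.length := by omega
        have hj1pos : 0 < j - 1 := by omega
        have hgetj1 : lines[j-1] = lines.getD (j-1) [] := by
          rw [List.getD_eq_getElem?_getD, List.getElem?_eq_getElem hj1lt]
          rfl
        have hcleane' : '\n' ∉ lines.getD (j-1) [] := by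
          rw [← hgetj1]
          exact hclean _ (List.getElem_mem _)
        have htakelen' : (lines.take (j-1)).length = j - 1 := by simp; omega
        have hst'ge : j - 1 ≤ pvStN (lines.take (j-1)) := by
          have := pvStN_ge_length (lines.take (j-1))
          omega
        have hQlen : (pvJoinNl (lines.take (j-1))).length + 1 = pvStN (lines.take (j-1)) :=
          pvJoinNl_length _ (by rw [← List.length_pos_iff]; omega)
        have hPdec : pvJoinNl (lines.take j)
            = pvJoinNl (lines.take (j-1)) ++ '\n' :: lines.getD (j-1) [] := by
          have hdd := pvJoinNl_decomp (lines.take j) (j-1) (by omega) (by rw [htakelen]; omega)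
          rw [hdd, List.take_take, min_eq_left (by omega)]
          congr 1
          rw [List.drop_take]
          have h1 : j - (j-1) = 1 := by omega
          rw [h1, List.drop_eq_getElem_cons hj1lt, hgetj1]
          rfl
        rw [hPdec, pvRfind_pos _ _ hcleane']
        have hql : ((pvJoinNl (lines.take (j-1))).length : Int) + 1
            = ((pvStN (lines.take (j-1)) : Nat) : Int) := by
          omega
        rw [hql, PySem.List.slice_natCast]
        have hdropst' : s.toList.drop (pvStN (lines.take (j-1)))
            = pvJoinNl (lines.drop (j-1)) := by
          rw [hcs, pvJoinNl_decomp lines (j-1) hj1pos hj1lt, List.drop_append,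
            List.drop_of_length_le (by omega)]
          have h1 : pvStN (lines.take (j-1)) - (pvJoinNl (lines.take (j-1))).length = 1 := by
            omega
          rw [h1]
          simp
        rw [hdropst']
        have hdropj1 : lines.drop (j-1) = lines.getD (j-1) [] :: lines.drop j := by
          have hjj : j - 1 + 1 = j := by omega
          rw [List.drop_eq_getElem_cons hj1lt, hgetj1, hjj]
        rw [hdropj1, pvJoinNl_cons _ _ (by rw [hdropj]; simp)]
        have hd1 : pvStN lines = pvStN (lines.take (j-1)) + pvStN (lines.drop (j-1)) :=
          pvStN_take_drop lines (j-1)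
        have hd2 : pvStN (lines.drop (j-1))
            = (lines.getD (j-1) []).length + 1 + pvStN (lines.drop j) := by
          rw [hdropj1]
          simp [pvStN]
        have hsplit' : stN = pvStN (lines.take (j-1)) + (lines.getD (j-1) []).length + 1 := by
          omega
        have h1 : stN - pvStN (lines.take (j-1)) = (lines.getD (j-1) []).length + 1 := by omega
        rw [h1]
        exact pvTakeNl _ _
    · have hj00 : j = 0 := by omega
      have h00 : stN = 0 := by rw [hstN, hj00]; simp [pvStN]
      rw [if_pos (by omega : (stN : Int) - 1 = -1), if_neg hj0]
  -- assemble
  simp only [print_error_alt, pvCanon]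
  rw [hA]
  have h11 : (stN : Int) - 1 + 1 = (stN : Int) := by ring
  rw [h11, hFindE, habove]
  by_cases hb : j + 1 < lines.length
  · rw [if_pos hb]
    have hgetj2 : lines[j+1] = lines.getD (j+1) [] := by
      rw [List.getD_eq_getElem?_getD, List.getElem?_eq_getElem hb]
      rfl
    have hcleane2 : '\n' ∉ lines.getD (j+1) [] := by
      rw [← hgetj2]
      exact hclean _ (List.getElem_mem _)
    have hdropj2 : lines.drop (j+1) = lines.getD (j+1) [] :: lines.drop (j+2) := by
      rw [List.drop_eq_getElem_cons hb, hgetj2]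
    have hJ2 : s.toList.drop stN = e ++ '\n' :: pvJoinNl (lines.drop (j+1)) := by
      rw [hdrop_cs, hdropj, pvJoinNl_cons _ _ (by rw [hdropj2]; simp)]
    have hk2ge : 1 ≤ pvStN (lines.drop (j+1)) := by
      have h1 := pvStN_ge_length (lines.drop (j+1))
      have h2 : 0 < (lines.drop (j+1)).length := by simp; omega
      omega
    have hdJ : pvStN (lines.drop j) = e.length + 1 + pvStN (lines.drop (j+1)) := by
      rw [hdropj]
      simp [pvStN]
    have hk2le : stN + e.length + 1 ≤ s.toList.length := by omega
    have hdrop_k2 : s.toList.drop (stN + e.length + 1) = pvJoinNl (lines.drop (j+1)) := by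
      have h1 : stN + e.length + 1 = stN + (e.length + 1) := by omega
      rw [h1, ← List.drop_drop, hJ2, List.drop_append, List.drop_of_length_le (by omega)]
      have h2 : e.length + 1 - e.length = 1 := by omega
      rw [h2]
      simp
    rw [if_neg (by omega : ¬((stN : Int) + (e.length : Int) = -1))]
    have hc1 : (stN : Int) + (e.length : Int) + 1 = ((stN + e.length + 1 : Nat) : Int) := by
      push_cast
      ring
    rw [hc1]
    have hcur : PySem.List.slice s.toList (some ((stN : Int)))
        (some ((stN + e.length + 1 : Nat) : Int)) = e ++ ['\n'] := by
      rw [PySem.List.slice_natCast]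
      have h1 : stN + e.length + 1 - stN = e.length + 1 := by omega
      rw [h1, hJ2]
      exact pvTakeNl _ _
    rw [hcur]
    by_cases hbb : lines.drop (j+2) = []
    · have hJ3 : pvJoinNl (lines.drop (j+1)) = lines.getD (j+1) [] := by
        rw [hdropj2, hbb]
        rfl
      have hff : PySem.Chars.findFrom s.toList ['\n'] ((stN + e.length + 1 : Nat) : Int) = -1 := by
        rw [PySem.Chars.findFrom_natCast s.toList ['\n'] _ hk2le, hdrop_k2, hJ3,
          pvFind_neg _ hcleane2]
        simp
      rw [hff]
      rw [if_neg (by simp : ¬((-1 : Int) ≠ -1))]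
      rw [PySem.List.slice_from_natCast, hdrop_k2, hJ3]
      simp [hb, List.append_assoc]
    · have hJ3 : pvJoinNl (lines.drop (j+1))
          = lines.getD (j+1) [] ++ '\n' :: pvJoinNl (lines.drop (j+2)) := by
        rw [hdropj2, pvJoinNl_cons _ _ hbb]
      have hff : PySem.Chars.findFrom s.toList ['\n'] ((stN + e.length + 1 : Nat) : Int)
          = ((stN + e.length + 1 : Nat) : Int) + ((lines.getD (j+1) []).length : Int) := by
        rw [PySem.Chars.findFrom_natCast s.toList ['\n'] _ hk2le, hdrop_k2, hJ3,
          pvFind_pos _ _ hcleane2]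
        rw [if_neg (by omega : ¬(((lines.getD (j+1) []).length : Int) = -1))]
      rw [hff]
      rw [if_pos (by omega :
        ¬(((stN + e.length + 1 : Nat) : Int) + ((lines.getD (j+1) []).length : Int) = -1))]
      have hc2 : ((stN + e.length + 1 : Nat) : Int) + ((lines.getD (j+1) []).length : Int) + 1
          = ((stN + e.length + 1 + (lines.getD (j+1) []).length + 1 : Nat) : Int) := by
        push_cast
        ring
      rw [hc2, PySem.List.slice_natCast]
      have h1 : stN + e.length + 1 + (lines.getD (j+1) []).length + 1 - (stN + e.length + 1)
          = (lines.getD (j+1) []).length + 1 := by omega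
      rw [h1, hdrop_k2, hJ3]
      rw [pvTakeNl]
      simp [hb, List.append_assoc]
  · rw [if_neg hb]
    rw [if_pos rfl]
    have hlast : lines.drop (j+1) = [] := List.drop_eq_nil_iff.mpr (by omega)
    have hcur0 : PySem.List.slice s.toList (some ((stN : Int))) none = e := by
      have h1 : ((stN : Nat) : Int) = (stN : Int) := rfl
      rw [← h1, PySem.List.slice_from_natCast, hdrop_cs, hdropj, hlast]
      rfl
    rw [hcur0]
    simp [hb, List.append_assoc]

-- ===== VERDICT (by name: the statement is the Claim_ definition above) =====
theorem print_error_spec : Claim_equal_print_error := by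
  unfold Claim_equal_print_error
  intro s y z _hdom hpre
  obtain ⟨hy0, hylen, hz0⟩ := hpre
  unfold Spec_print_error
  have hne : PySem.Chars.splitOn s.toList ['\n'] ≠ [] := by
    rw [pvSplitOn_eq]; exact pvSplits_ne_nil _ _
  have hsum : pvSumNl (PySem.Chars.splitOn s.toList ['\n']) = (s.toList.length : Int) + 1 := by
    rw [pvSplitOn_eq]; simpa using pvSumNl_splits s.toList []
  set cs := s.toList with hcs0
  set lines := PySem.Chars.splitOn cs ['\n'] with hlns
  have hcleanL : ∀ p ∈ lines, '\n' ∉ p := by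
    rw [hlns, pvSplitOn_eq]
    exact pvSplits_clean cs [] (by simp)
  have hcsJ : cs = pvJoinNl lines := by
    rw [hlns, pvSplitOn_eq]
    have := pvJoinNl_splits cs []
    simp at this
    exact this.symm
  obtain ⟨j, e, hj, he, hscan, hstle, hyle, hstrict⟩ :=
    pvScan_spec y lines 0 0 hne hy0 (by rw [hsum]; omega)
  norm_num at hscan hstle hyle hstrict
  have hcast : pvSumNl (lines.take j) = ((pvStN (lines.take j) : Nat) : Int) :=
    pvSumNl_eq_stN _
  -- B side reduces to the canonical window form
  have hBside := pvAltCanon s y z lines j e hcsJ hcleanL hj he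
    (by rw [← hcast]; exact hstle) (fun h0 => by rw [← hcast]; exact hstrict h0)
    (by rw [← hcast]; exact hyle) hy0 hylen
  rw [hBside]
  -- A side
  simp only [print_error, pvCanon]
  set S := lines.map (· ++ ['\n']) with hS
  have hfold : (PySem.List.enumerate lines 0).foldl
      (fun acc p => PySem.List.pySetD acc p.1 (p.2 ++ ['\n'])) lines = S := by
    have := pvSetAll_eq (· ++ ['\n']) lines []
    simpa using this
  rw [hfold]
  have hnodup : (List.map (fun p => p.1) (PySem.List.enumerate S 0)).Nodup := by
    have hpw := PySem.List.pairwise_lt_enumerate S 0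
    exact (List.pairwise_map.mpr hpw).imp (fun h => ne_of_lt h)
  have hitems : ((PySem.List.enumerate S 0).foldl
      (fun d p => d.insert p.1 ((p.2.length : Int))) PySem.Dict.empty).items
      = (PySem.List.enumerate S 0).map (fun p => (p.1, (p.2.length : Int))) := by
    have := PySem.Dict.items_foldl_insert_fresh (PySem.List.enumerate S 0)
      (fun p => p.1) (fun p => ((p.2.length : Int))) PySem.Dict.empty
      (fun a _ => PySem.Dict.contains_empty _) hnodup
    simpa using this
  rw [hitems]
  have hfx : pvItemsLoopA S y
      ((PySem.List.enumerate S 0).map (fun p => (p.1, (p.2.length : Int)))) 0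
      = ((j : Int), y - pvSumNl (List.take j lines)) := by
    have h1 := pvLoopA_eq y S S 0 0 (by simp)
    norm_num at h1
    have h2 := pvFIdx_scan y lines 0 0 hne (by rw [hsum]; omega)
    norm_num at h2
    rw [← hS] at h2
    rw [h1, h2, hscan]
  have hA1 : (pvItemsLoopA S y
      ((PySem.List.enumerate S 0).map (fun p => (p.1, (p.2.length : Int)))) 0).1
      = ((j : Int)) := by rw [hfx]
  have hA2 : (pvItemsLoopA S y
      ((PySem.List.enumerate S 0).map (fun p => (p.1, (p.2.length : Int)))) 0).2
      = y - pvSumNl (List.take j lines) := by rw [hfx]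
  rw [hA1, hA2]
  have hcur : PySem.List.pyGetD S ((j : Int)) [] = e ++ ['\n'] := by
    have hSj : S[j]? = some (e ++ ['\n']) := by
      rw [hS, List.getElem?_map, he]
      rfl
    rw [PySem.List.pyGetD_natCast, List.getD_eq_getElem?_getD, hSj]
    rfl
  have habove : (if ((j : Int)) > 0 then PySem.List.pyGetD S ((j : Int) - 1) [] else [])
      = (if 0 < j then lines.getD (j-1) [] ++ ['\n'] else []) := by
    by_cases h0 : 0 < j
    · rw [if_pos (by exact_mod_cast h0), if_pos h0]
      have hj1 : ((j : Int)) - 1 = ((j - 1 : Nat) : Int) := by omega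
      have hlt : j - 1 < lines.length := by omega
      rw [hj1, PySem.List.pyGetD_natCast]
      rw [List.getD_eq_getElem?_getD, List.getD_eq_getElem?_getD]
      rw [hS, List.getElem?_map, List.getElem?_eq_getElem hlt]
      rfl
    · rw [if_neg (by exact_mod_cast h0), if_neg h0]
  have hSlen : ((S.length : Nat) : Int) = ((lines.length : Nat) : Int) := by rw [hS]; simp
  have hbelow : (if ((S.length : Nat) : Int) > ((j : Int)) + 1 then
        PySem.List.pyGetD S ((j : Int) + 1) [] else [])
      = (if j + 1 < lines.length then lines.getD (j+1) [] ++ ['\n'] else []) := by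
    rw [hSlen]
    by_cases hb : j + 1 < lines.length
    · rw [if_pos (by exact_mod_cast hb), if_pos hb]
      have hc : ((j : Int)) + 1 = ((j + 1 : Nat) : Int) := by push_cast; ring
      rw [hc, PySem.List.pyGetD_natCast]
      rw [List.getD_eq_getElem?_getD, List.getD_eq_getElem?_getD]
      rw [hS, List.getElem?_map, List.getElem?_eq_getElem hb]
      rfl
    · rw [if_neg (by exact_mod_cast hb), if_neg hb]
  rw [hcur, habove, hbelow]
  have hwin : PySem.Chars.join []
      [(if 0 < j then lines.getD (j-1) [] ++ ['\n'] else []),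
       e ++ ['\n'],
       (if j + 1 < lines.length then lines.getD (j+1) [] ++ ['\n'] else [])]
      = (if 0 < j then lines.getD (j-1) [] ++ ['\n'] else [])
        ++ (e ++ ('\n' :: (if j + 1 < lines.length then
          lines.getD (j+1) [] ++ ['\n'] else []))) := by
    rw [pvJoin_nil_flatten]
    simp
  rw [hwin]
  set ab := (if 0 < j then lines.getD (j-1) [] ++ ['\n'] else []) with hab
  set bl := (if j + 1 < lines.length then lines.getD (j+1) [] ++ ['\n'] else []) with hbl
  set st := pvSumNl (List.take j lines) with hst
  have hn0 : (0 : Int) ≤ ((ab.length : Nat) : Int) + (y - st) := by omega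
  have hnW : ((ab.length : Nat) : Int) + (y - st)
      ≤ (((ab ++ (e ++ '\n' :: bl)).length : Nat) : Int) := by
    simp [List.length_append]
    omega
  rw [pvClipLeft (ab ++ (e ++ '\n' :: bl)) (((ab.length : Nat) : Int) + (y - st)) z hn0 hz0 hnW]
  rw [pvClipRight (PySem.List.slice (ab ++ (e ++ '\n' :: bl))
      (some ((((ab.length : Nat) : Int) + (y - st)) + 1)) none) z hz0]
  rw [pvCaret]
  rw [pvJoin_nil_flatten]
  rw [hcast]
  simp [List.append_assoc]
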